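-- pv_equiv track=rewrite | github.com/jyj1111/Bjo | 프로그래머스/4/118670. 행렬과 연산/행렬과 연산.py | solution
-- ===== SOURCE A (Python) =====
-- from collections import deque
--
-- def solution(rc, operations):
--     firstDeque=deque([r[0] for r in rc])
--     midDeque=deque([deque(r[1:-1]) for r in rc])
--     lastDeque=deque([r[-1] for r in rc])
--     for operation in operations:
--         if operation=='ShiftRow':
--             firstDeque.appendleft(firstDeque.pop())
--             midDeque.appendleft(midDeque.pop())
--             lastDeque.appendleft(lastDeque.pop())
--         elif operation=='Rotate':
--             midDeque[0].appendleft(firstDeque.popleft())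
--             lastDeque.appendleft(midDeque[0].pop())
--             midDeque[-1].append(lastDeque.pop())
--             firstDeque.append(midDeque[-1].popleft())
--
--     return [[firstDeque[i]]+list(midDeque[i])+[lastDeque[i]] for i in range(len(rc))]
-- ===== SOURCE B (Python) =====
-- def solution(rc, operations):
--     m = [list(r) for r in rc]
--     for op in operations:
--         if op == 'ShiftRow':
--             m = [m[-1]] + m[:-1]
--         elif op == 'Rotate':
--             mids = [[nx[0]] + c[1:-1] + [p[-1]] for p, c, nx in zip(m, m[1:], m[2:])]
--             m = [[m[1][0]] + m[0][:-1]] + mids + [m[-1][1:] + [m[-2][-1]]]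
--     return m
-- ===== Notes on version B (the rewrite author's own statement) =====
-- stated objective: alternative
-- what changed: B keeps the state as one plain matrix (list of rows) instead of A's three-deque column split: ShiftRow moves the last row to the front, and Rotate rebuilds the boundary in place per row (top row shifted right, middle rows rebuilt from their vertical neighbours via zip, bottom row shifted left), with no deque surgery.
-- outside the precondition, e.g. on solution([[5]], []): A returns [[5, 5]], B returns [[5]]; on solution([[1, 2, 3]], ['Rotate']): A returns [[1, 3, 2]], B raises IndexError; on solution([[1], [2]], ['Rotate']): A returns [[2, 1], [2, 1]], B returns [[2], [1]]
import Mathlib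
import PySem

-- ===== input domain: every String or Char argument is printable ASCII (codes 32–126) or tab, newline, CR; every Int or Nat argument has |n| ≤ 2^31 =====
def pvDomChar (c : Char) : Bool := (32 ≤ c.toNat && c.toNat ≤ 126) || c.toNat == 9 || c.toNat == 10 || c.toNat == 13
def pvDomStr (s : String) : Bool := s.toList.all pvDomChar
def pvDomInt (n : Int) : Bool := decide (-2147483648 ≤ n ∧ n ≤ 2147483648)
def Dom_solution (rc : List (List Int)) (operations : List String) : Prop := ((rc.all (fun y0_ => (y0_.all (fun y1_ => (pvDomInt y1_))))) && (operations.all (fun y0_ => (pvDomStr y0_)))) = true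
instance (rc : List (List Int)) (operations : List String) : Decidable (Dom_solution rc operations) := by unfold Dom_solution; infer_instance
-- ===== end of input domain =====

-- B keeps the state as one plain matrix instead of A's three-deque column split; return values agree on Pre_ (same cost class, objective: alternative).

-- ===== PORT A =====
-- one operation on A's state (firstDeque, midDeque, lastDeque); deques are Lists.
-- deque.pop/popleft on an empty deque raises in Python (excluded by Pre_); ported as
-- getLastD/headD with a junk default, exact whenever the deque is nonempty.
def solAStep (st : List Int × List (List Int) × List Int) (op : String) :
    List Int × List (List Int) × List Int :=
  let f := st.1; let m := st.2.1; let l := st.2.2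
  if op = "ShiftRow" then
    -- appendleft(pop()) on each deque
    (f.getLastD 0 :: f.dropLast, m.getLastD [] :: m.dropLast, l.getLastD 0 :: l.dropLast)
  else if op = "Rotate" then
    let m0 := f.headD 0 :: m.headD []            -- midDeque[0].appendleft(firstDeque.popleft())
    let f := f.tail
    let l := m0.getLastD 0 :: l                  -- lastDeque.appendleft(midDeque[0].pop())
    let m0 := m0.dropLast
    let m := m0 :: m.tail
    let mL := m.getLastD [] ++ [l.getLastD 0]    -- midDeque[-1].append(lastDeque.pop())
    let l := l.dropLast
    let f := f ++ [mL.headD 0]                   -- firstDeque.append(midDeque[-1].popleft())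
    let mL := mL.tail
    (f, m.dropLast ++ [mL], l)
  else (f, m, l)

-- r[0] / r[-1] raise on an empty row (excluded by Pre_): ported as headD/getLastD, exact on nonempty rows.
def solution (rc : List (List Int)) (operations : List String) : List (List Int) :=
  let f := rc.map (fun r => r.headD 0)                                   -- [r[0] for r in rc]
  let m := rc.map (fun r => PySem.List.slice r (some 1) (some (-1)))     -- [r[1:-1] for r in rc]
  let l := rc.map (fun r => r.getLastD 0)                                -- [r[-1] for r in rc]
  let st := operations.foldl solAStep (f, m, l)
  (List.range rc.length).map (fun i => st.1.getD i 0 :: (st.2.1.getD i [] ++ [st.2.2.getD i 0]))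

-- ===== PORT B =====
-- Rotate on the whole matrix: top row shifted right, each middle row rebuilt from its
-- vertical neighbours (zip of m, m[1:], m[2:]), bottom row shifted left.
-- m[1] / m[-2] raise when the matrix has fewer than 2 rows (excluded by Pre_):
-- ported as tail.headD / dropLast.getLastD, exact for 2 ≤ m.length.
def solBRot (m : List (List Int)) : List (List Int) :=
  let mids := (m.zip ((m.tail).zip m.tail.tail)).map
      (fun pcn => pcn.2.2.headD 0 ::
        (PySem.List.slice pcn.2.1 (some 1) (some (-1)) ++ [pcn.1.getLastD 0]))
  (((m.tail.headD []).headD 0 :: (m.headD []).dropLast) :: mids)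
    ++ [(m.getLastD []).tail ++ [(m.dropLast.getLastD []).getLastD 0]]

def solBStep (m : List (List Int)) (op : String) : List (List Int) :=
  if op = "ShiftRow" then m.getLastD [] :: m.dropLast
  else if op = "Rotate" then solBRot m
  else m

def solution_alt (rc : List (List Int)) (operations : List String) : List (List Int) :=
  operations.foldl solBStep rc

-- ===== PRECONDITION & SPEC =====
-- Pre_ excludes matrices with a row shorter than 2 (A's first/last-column split then
-- duplicates the cell, an artefact of the split), single-row matrices under 'Rotate'
-- (A's midDeque[0] and midDeque[-1] alias the same deque, an accidental result;
-- B raises there), and empty matrices under 'ShiftRow'/'Rotate' (A raises IndexError).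
def Pre_solution (rc : List (List Int)) (operations : List String) : Prop :=
  (∀ r ∈ rc, 2 ≤ r.length) ∧ ("ShiftRow" ∈ operations → rc ≠ []) ∧
    ("Rotate" ∈ operations → 2 ≤ rc.length)
instance (rc : List (List Int)) (operations : List String) : Decidable (Pre_solution rc operations) := by
  unfold Pre_solution; infer_instance

def pvWitness_solution : List (List Int) × List String :=
  ([[1, 2, 3], [4, 5, 6], [7, 8, 9]], ["Rotate", "ShiftRow", "Rotate"])

def Spec_solution (rc : List (List Int)) (operations : List String) (out : List (List Int)) : Prop := out = solution_alt rc operations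
instance (rc : List (List Int)) (operations : List String) (out : List (List Int)) : Decidable (Spec_solution rc operations out) := by unfold Spec_solution; infer_instance

-- ===== CLAIM (what is proved, stated in full; the proofs are below) =====
def Claim_equal_solution : Prop := ∀ (rc : List (List Int)) (operations : List String), Dom_solution rc operations → Pre_solution rc operations → Spec_solution rc operations (solution rc operations)

-- ===== LEMMAS AND PROOFS =====

-- abstraction: A's three deques are the column split of B's matrix
def hd0 (r : List Int) : Int := r.headD 0
def md0 (r : List Int) : List Int := r.tail.dropLast
def ls0 (r : List Int) : Int := r.getLastD 0
def decM (m : List (List Int)) : List Int × List (List Int) × List Int :=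
  (m.map hd0, m.map md0, m.map ls0)

lemma slice_one_negone (r : List Int) :
    PySem.List.slice r (some 1) (some (-1)) = r.tail.dropLast := by
  simp only [PySem.List.slice, PySem.List.clampIdx, List.dropLast_eq_take]
  cases r with
  | nil => simp
  | cons a t =>
    simp
    split <;> omega

lemma cons_tail_dropLast (r : List Int) (h : 2 ≤ r.length) :
    r.headD 0 :: r.tail.dropLast = r.dropLast := by
  match r, h with
  | a :: b :: t, _ => simp

lemma dropLast_append_getLastD (r : List Int) (h : r ≠ []) (d : Int) :
    r.dropLast ++ [r.getLastD d] = r := by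
  rcases r.eq_nil_or_concat with h' | ⟨t, b, h'⟩
  · exact absurd h' h
  · subst h'; simp

-- ShiftRow step commutes with the abstraction
lemma stepA_shift (m : List (List Int)) (h : m ≠ []) :
    solAStep (decM m) "ShiftRow" = decM (m.getLastD [] :: m.dropLast) := by
  rcases m.eq_nil_or_concat with h' | ⟨t, b, h'⟩
  · exact absurd h' h
  · subst h'; simp [solAStep, decM]

lemma getLastD_concat' {α : Type} : ∀ (l : List α) (a b d : α), (a :: (l ++ [b])).getLastD d = b := by
  intro l
  induction l with
  | nil => intro a b d; simp
  | cons c l ih => intro a b d; simpa using ih c b d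

lemma dropLast_concat' {α : Type} : ∀ (l : List α) (a b : α), (a :: (l ++ [b])).dropLast = a :: l := by
  intro l
  induction l with
  | nil => intro a b; simp
  | cons c l ih => intro a b; simpa using ih c b

lemma getLastD_irrel {α : Type} (l : List α) (h : l ≠ []) (d d' : α) :
    l.getLastD d = l.getLastD d' := by
  rcases l.eq_nil_or_concat with h' | ⟨t, b, h'⟩
  · exact absurd h' h
  · subst h'; simp

lemma headD_append_left {α : Type} (l l' : List α) (h : l ≠ []) (d : α) :
    (l ++ l').headD d = l.headD d := by
  cases l with
  | nil => exact absurd rfl h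
  | cons a t => simp

lemma tail_dropLast_append {α : Type} (l : List α) (b : α) (h : l ≠ []) :
    (l ++ [b]).tail.dropLast = l.tail := by
  cases l with
  | nil => exact absurd rfl h
  | cons a t => simp

lemma getLastD_tail_eq (r : List Int) (h : r.tail ≠ []) (d : Int) :
    r.getLastD d = r.tail.getLastD d := by
  cases r with
  | nil => simp at h
  | cons a t => cases t with
    | nil => simp at h
    | cons b u => simp

lemma zip3_proj {α : Type} : ∀ (z y x : List α), z.length ≤ y.length → y.length ≤ x.length →
    ((x.zip (y.zip z)).map (fun p => p.2.2) = z) ∧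
    ((x.zip (y.zip z)).map (fun p => p.2.1) = y.take z.length) ∧
    ((x.zip (y.zip z)).map (fun p => p.1) = x.take z.length) := by
  intro z
  induction z with
  | nil => intro y x _ _; simp
  | cons c z ih =>
    intro y x h1 h2
    match y, x with
    | b :: y, a :: x =>
      have := ih y x (by simpa using h1) (by simpa using h2)
      simp [this.1, this.2.1, this.2.2]

lemma stepA_rot_core (r0 bt : List Int) (ts : List (List Int)) (h0 : 2 ≤ r0.length)
    (hb : 2 ≤ bt.length) :
    solAStep (decM (r0 :: (ts ++ [bt]))) "Rotate" = decM (solBRot (r0 :: (ts ++ [bt]))) := by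
  have hbt : bt.tail ≠ [] := by
    cases bt with
    | nil => simp at hb
    | cons a t => cases t with
      | nil => simp at hb
      | cons b u => simp
  have hr0 : r0.dropLast ≠ [] := by
    match r0, h0 with
    | a :: b :: t, _ => simp
  -- projections of the zip
  obtain ⟨p22, p21, p1⟩ := zip3_proj (ts ++ [bt]).tail (ts ++ [bt]) (r0 :: (ts ++ [bt]))
    (by simp [List.length_tail]) (by simp)
  have htlen : (ts ++ [bt]).tail.length = ts.length := by simp [List.length_tail]
  rw [htlen, (by simpa using List.take_left ts [bt] : (ts ++ [bt]).take ts.length = ts)] at p21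
  rw [htlen, (show (r0 :: (ts ++ [bt])).take ts.length = (r0 :: ts).dropLast by
    rw [show (r0 :: (ts ++ [bt])) = (r0 :: ts) ++ [bt] by simp,
      List.take_append_of_le_length (by simp), List.dropLast_eq_take]; simp)] at p1
  simp only [solAStep, decM, solBRot, if_neg (by decide : ¬("Rotate" = "ShiftRow")), if_true,
    List.map_cons, List.map_append, List.map_map, List.map_nil, List.headD_cons, List.tail_cons,
    slice_one_negone]
  simp only [hd0, md0, ls0, List.headD_cons, List.tail_cons]
  rw [cons_tail_dropLast r0 h0]
  rw [getLastD_concat' (List.map md0 ts) r0.dropLast.dropLast bt.tail.dropLast []]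
  rw [show (r0.dropLast.getLastD 0 :: r0.getLastD 0 :: (List.map ls0 ts ++ [bt.getLastD 0])).getLastD 0
        = bt.getLastD 0 by
      rw [List.getLastD_cons]; exact getLastD_concat' (List.map ls0 ts) (r0.getLastD 0) _ _]
  rw [show bt.tail.dropLast ++ [bt.getLastD 0] = bt.tail by
      rw [getLastD_tail_eq bt hbt 0]; exact dropLast_append_getLastD bt.tail hbt 0]
  rw [dropLast_concat' (List.map md0 ts) r0.dropLast.dropLast bt.tail.dropLast]
  rw [show (r0.dropLast.getLastD 0 :: r0.getLastD 0 :: (List.map ls0 ts ++ [bt.getLastD 0])).dropLast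
        = r0.dropLast.getLastD 0 :: r0.getLastD 0 :: List.map ls0 ts by
      simpa using dropLast_concat' (r0.getLastD 0 :: List.map ls0 ts) (r0.dropLast.getLastD 0) (bt.getLastD 0)]
  rw [show (r0 :: (ts ++ [bt])).getLastD [] = bt by simpa using getLastD_concat' ts r0 bt []]
  rw [show (r0 :: (ts ++ [bt])).dropLast = r0 :: ts by simpa using dropLast_concat' ts r0 bt]
  have hm1 : List.map (hd0 ∘ fun pcn => pcn.2.2.headD 0 :: (pcn.2.1.tail.dropLast ++ [pcn.1.getLastD 0]))
      ((r0 :: (ts ++ [bt])).zip ((ts ++ [bt]).zip (ts ++ [bt]).tail)) = List.map hd0 (ts ++ [bt]).tail := by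
    conv_rhs => rw [← p22]
    rw [List.map_map]
    exact List.map_congr_left (fun a _ => rfl)
  have hm2 : List.map (md0 ∘ fun pcn => pcn.2.2.headD 0 :: (pcn.2.1.tail.dropLast ++ [pcn.1.getLastD 0]))
      ((r0 :: (ts ++ [bt])).zip ((ts ++ [bt]).zip (ts ++ [bt]).tail)) = List.map md0 ts := by
    conv_rhs => rw [← p21]
    rw [List.map_map]
    refine List.map_congr_left (fun a _ => ?_)
    simp [md0]
  have hm3 : List.map (ls0 ∘ fun pcn => pcn.2.2.headD 0 :: (pcn.2.1.tail.dropLast ++ [pcn.1.getLastD 0]))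
      ((r0 :: (ts ++ [bt])).zip ((ts ++ [bt]).zip (ts ++ [bt]).tail)) = List.map ls0 ((r0 :: ts).dropLast) := by
    conv_rhs => rw [← p1]
    rw [List.map_map]
    refine List.map_congr_left (fun a _ => ?_)
    show ls0 (a.2.2.headD 0 :: (a.2.1.tail.dropLast ++ [a.1.getLastD 0])) = ls0 a.1
    simp only [ls0]
    exact getLastD_concat' _ _ _ _
  rw [hm1, hm2, hm3]
  rw [headD_append_left bt.tail _ hbt 0, tail_dropLast_append bt.tail _ hbt,
    (by simp : (bt.tail ++ [((r0 :: ts).getLastD []).getLastD 0]).getLastD 0 = ((r0 :: ts).getLastD []).getLastD 0)]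
  rw [show (((ts ++ [bt]).headD []).headD 0 :: r0.dropLast).getLastD 0 = r0.dropLast.getLastD 0 by
    rw [List.getLastD_cons]; exact getLastD_irrel r0.dropLast hr0 _ _]
  rw [show ((ts ++ [bt]).headD []).headD 0 :: List.map hd0 (ts ++ [bt]).tail = List.map hd0 ts ++ [bt.headD 0] by
    cases ts <;> simp [hd0]]
  refine congrArg (Prod.mk _) (congrArg (Prod.mk _) ?_)
  refine (congrArg (List.cons (r0.dropLast.getLastD 0)) ?_)
  symm
  have h1 : ((r0 :: ts).getLastD []).getLastD 0 = (List.map ls0 (r0 :: ts)).getLastD 0 := by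
    rcases (r0 :: ts).eq_nil_or_concat with h' | ⟨t, b, h'⟩
    · simp at h'
    · rw [h']; simp [ls0]
  have h2 : List.map ls0 ((r0 :: ts).dropLast) = (List.map ls0 (r0 :: ts)).dropLast := by
    simp [List.map_dropLast]
  rw [h1, h2]
  show (List.map ls0 (r0 :: ts)).dropLast ++ [(List.map ls0 (r0 :: ts)).getLastD 0]
      = r0.getLastD 0 :: List.map ls0 ts
  rw [dropLast_append_getLastD _ (by simp) 0]
  simp [ls0]

-- Rotate step commutes with the abstraction
lemma stepA_rot (m : List (List Int)) (h2 : 2 ≤ m.length) (hr : ∀ r ∈ m, 2 ≤ r.length) :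
    solAStep (decM m) "Rotate" = decM (solBRot m) := by
  cases m with
  | nil => simp at h2
  | cons r0 rs =>
    rcases rs.eq_nil_or_concat with hrs | ⟨ts, bt, hrs⟩
    · subst hrs; simp at h2
    · rw [List.concat_eq_append] at hrs
      subst hrs
      exact stepA_rot_core r0 bt ts (hr r0 (by simp)) (hr bt (by simp))

lemma solBRot_shape (m : List (List Int)) (h2 : 2 ≤ m.length) (hr : ∀ r ∈ m, 2 ≤ r.length) :
    (solBRot m).length = m.length ∧ ∀ r ∈ solBRot m, 2 ≤ r.length := by
  cases m with
  | nil => simp at h2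
  | cons r0 rs =>
    rcases rs.eq_nil_or_concat with hrs | ⟨ts, bt, hrs⟩
    · subst hrs; simp at h2
    · rw [List.concat_eq_append] at hrs
      subst hrs
      have h0 : 2 ≤ r0.length := hr r0 (by simp)
      have hb : 2 ≤ bt.length := hr bt (by simp)
      constructor
      · simp [solBRot, List.length_zip, List.length_tail]
        omega
      · intro r hrm
        simp only [solBRot, List.mem_append, List.mem_cons, List.mem_map] at hrm
        rcases hrm with (hc | ⟨pcn, _, hc⟩) | hc | hc
        · subst hc; simp; omega
        · subst hc; simp
        · subst hc
          rw [show (r0 :: (ts ++ [bt])).getLastD [] = bt by simpa using getLastD_concat' ts r0 bt []]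
          simp
          omega
        · simp at hc

lemma main_fold : ∀ (ops : List String) (m : List (List Int)),
    (∀ r ∈ m, 2 ≤ r.length) → ("ShiftRow" ∈ ops → m ≠ []) → ("Rotate" ∈ ops → 2 ≤ m.length) →
    ops.foldl solAStep (decM m) = decM (ops.foldl solBStep m) ∧
      (ops.foldl solBStep m).length = m.length ∧ (∀ r ∈ ops.foldl solBStep m, 2 ≤ r.length) := by
  intro ops
  induction ops with
  | nil => intro m hr _ _; exact ⟨rfl, rfl, hr⟩
  | cons op ops ih =>
    intro m hr hs hrot
    by_cases hop1 : op = "ShiftRow"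
    · subst hop1
      have hm : m ≠ [] := hs List.mem_cons_self
      have hstep : solBStep m "ShiftRow" = m.getLastD [] :: m.dropLast := by
        simp [solBStep]
      have hrows : ∀ r ∈ m.getLastD [] :: m.dropLast, 2 ≤ r.length := by
        intro r hrm
        rcases List.mem_cons.mp hrm with h' | h'
        · subst h'
          rcases m.eq_nil_or_concat with h'' | ⟨t, b, h''⟩
          · exact absurd h'' hm
          · subst h''; simpa using hr b (by simp)
        · exact hr r (List.mem_of_mem_dropLast h')
      have hlen : (m.getLastD [] :: m.dropLast).length = m.length := by
        have : m.length ≠ 0 := fun h' => hm (List.eq_nil_of_length_eq_zero h')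
        simp [List.length_dropLast]
        omega
      have := ih (m.getLastD [] :: m.dropLast) hrows
        (fun h' => by simp)
        (fun h' => by rw [hlen]; exact hrot (List.mem_cons_of_mem _ h'))
      refine ⟨?_, ?_, ?_⟩
      · simp only [List.foldl_cons, hstep, stepA_shift m hm]
        exact this.1
      · simp only [List.foldl_cons, hstep]
        rw [this.2.1, hlen]
      · simp only [List.foldl_cons, hstep]
        exact this.2.2
    · by_cases hop2 : op = "Rotate"
      · subst hop2
        have hm2 : 2 ≤ m.length := hrot List.mem_cons_self
        have hstep : solBStep m "Rotate" = solBRot m := by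
          simp [solBStep]
        obtain ⟨hlen, hrows⟩ := solBRot_shape m hm2 hr
        have := ih (solBRot m) hrows
          (fun _ => by
            have : 0 < (solBRot m).length := by omega
            exact fun h' => by simp [h'] at this)
          (fun h' => by rw [hlen]; exact hrot (List.mem_cons_of_mem _ h'))
        refine ⟨?_, ?_, ?_⟩
        · simp only [List.foldl_cons, hstep, stepA_rot m hm2 hr]
          exact this.1
        · simp only [List.foldl_cons, hstep]
          rw [this.2.1, hlen]
        · simp only [List.foldl_cons, hstep]
          exact this.2.2
      · have hstepB : solBStep m op = m := by simp [solBStep, hop1, hop2]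
        have hstepA : solAStep (decM m) op = decM m := by simp [solAStep, hop1, hop2]
        have := ih m hr (fun h' => hs (List.mem_cons_of_mem _ h')) (fun h' => hrot (List.mem_cons_of_mem _ h'))
        refine ⟨?_, ?_, ?_⟩
        · simp only [List.foldl_cons, hstepB, hstepA]; exact this.1
        · simp only [List.foldl_cons, hstepB]; exact this.2.1
        · simp only [List.foldl_cons, hstepB]; exact this.2.2

lemma recombine (m : List (List Int)) (hr : ∀ r ∈ m, 2 ≤ r.length) :
    (List.range m.length).map
      (fun i => (m.map hd0).getD i 0 :: ((m.map md0).getD i [] ++ [(m.map ls0).getD i 0])) = m := by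
  induction m with
  | nil => simp
  | cons r t ih =>
    have hr2 : 2 ≤ r.length := hr r List.mem_cons_self
    have ht := ih (fun x hx => hr x (List.mem_cons_of_mem _ hx))
    simp only [List.length_cons, List.range_succ_eq_map, List.map_cons, List.map_map]
    refine List.cons_eq_cons.mpr ⟨?_, ?_⟩
    · show hd0 r :: (md0 r ++ [ls0 r]) = r
      match r, hr2 with
      | a :: b :: u, _ =>
        simp [hd0, md0, ls0]
        have : (b :: u).dropLast ++ [(b :: u).getLastD 0] = b :: u :=
          dropLast_append_getLastD _ (by simp) 0
        simpa using this
    · simpa [Function.comp_def, List.getElem?_cons_succ, List.getElem?_map] using ht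

-- ===== VERDICT (by name: the statement is the Claim_ definition above) =====
theorem solution_spec : Claim_equal_solution := by
  intro rc ops _dom hpre
  obtain ⟨hr, hs, hrot⟩ := hpre
  show solution rc ops = solution_alt rc ops
  have hz : solution rc ops = (List.range rc.length).map
      (fun i => (ops.foldl solAStep (rc.map (fun r => r.headD 0),
          rc.map (fun r => PySem.List.slice r (some 1) (some (-1))),
          rc.map (fun r => r.getLastD 0))).1.getD i 0 ::
        ((ops.foldl solAStep (rc.map (fun r => r.headD 0),
          rc.map (fun r => PySem.List.slice r (some 1) (some (-1))),
          rc.map (fun r => r.getLastD 0))).2.1.getD i [] ++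
         [(ops.foldl solAStep (rc.map (fun r => r.headD 0),
          rc.map (fun r => PySem.List.slice r (some 1) (some (-1))),
          rc.map (fun r => r.getLastD 0))).2.2.getD i 0])) := rfl
  rw [hz]
  show _ = ops.foldl solBStep rc
  have hinit : (rc.map (fun r => r.headD 0),
      rc.map (fun r => PySem.List.slice r (some 1) (some (-1))),
      rc.map (fun r => r.getLastD 0)) = decM rc := by
    simp only [decM, slice_one_negone]
    rfl
  obtain ⟨hfold, hlen, hrows⟩ := main_fold ops rc hr hs hrot
  rw [hinit, hfold]
  simp only [decM]
  have h2 := recombine (ops.foldl solBStep rc) hrows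
  rw [hlen] at h2
  exact h2
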